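-- pv_equiv track=rewrite | github.com/HayeAdX/Test | param:align_cpp_params.py | split_top_level_default
-- ===== SOURCE A (Python) =====
-- from typing import List, Optional, Tuple
--
-- def split_top_level_default(s: str) -> Tuple[str, str]:
--     """Sépare 'type nom' et '= valeur_par_defaut' au niveau supérieur."""
--     depths = {"(": 0, "[": 0, "{": 0, "<": 0}
--     state = "code"
--     i = 0
--
--     while i < len(s):
--         ch = s[i]
--         nxt = s[i + 1] if i + 1 < len(s) else ""
--         prev = s[i - 1] if i > 0 else ""
--
--         if state == "code":
--             if ch == "/" and nxt == "/":
--                 state = "line_comment"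
--                 i += 2
--                 continue
--             if ch == "/" and nxt == "*":
--                 state = "block_comment"
--                 i += 2
--                 continue
--             if ch == '"':
--                 state = "string"
--                 i += 1
--                 continue
--             if ch == "'":
--                 state = "char"
--                 i += 1
--                 continue
--
--             if ch == "(":
--                 depths["("] += 1
--             elif ch == ")" and depths["("] > 0:
--                 depths["("] -= 1
--             elif ch == "[":
--                 depths["["] += 1
--             elif ch == "]" and depths["["] > 0:
--                 depths["["] -= 1
--             elif ch == "{":
--                 depths["{"] += 1
--             elif ch == "}" and depths["{"] > 0:
--                 depths["{"] -= 1
--             elif ch == "<":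
--                 depths["<"] += 1
--             elif ch == ">" and depths["<"] > 0:
--                 depths["<"] -= 1
--             elif ch == "=" and all(v == 0 for v in depths.values()) and prev not in "<>!=" and nxt != "=":
--                 return s[:i], s[i:]
--
--         elif state == "line_comment":
--             if ch == "\n":
--                 state = "code"
--
--         elif state == "block_comment":
--             if ch == "*" and nxt == "/":
--                 state = "code"
--                 i += 2
--                 continue
--
--         elif state == "string":
--             if ch == "\\":
--                 i += 2
--                 continue
--             if ch == '"':
--                 state = "code"
--
--         elif state == "char":
--             if ch == "\\":
--                 i += 2
--                 continue
--             if ch == "'":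
--                 state = "code"
--
--         i += 1
--
--     return s, ""
-- ===== SOURCE B (Python) =====
-- from typing import Tuple
--
-- def split_top_level_default(s: str) -> Tuple[str, str]:
--     """Split 'type name' and '= default' at top level (two-pass: mask, then scan)."""
--     # pass 1: same-length mask with comments and string/char literals blanked out
--     n = len(s)
--     m = []
--     st = "code"
--     i = 0
--     while i < n:
--         c = s[i]
--         if st == "code":
--             if c == "/" and i + 1 < n and s[i + 1] == "/":
--                 m.append("  "); st = "line"; i += 2; continue
--             if c == "/" and i + 1 < n and s[i + 1] == "*":
--                 m.append("  "); st = "block"; i += 2; continue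
--             if c == '"':
--                 m.append(" "); st = "string"; i += 1; continue
--             if c == "'":
--                 m.append(" "); st = "char"; i += 1; continue
--             m.append(c); i += 1
--         elif st == "line":
--             if c == "\n":
--                 st = "code"
--             m.append(" "); i += 1
--         elif st == "block":
--             if c == "*" and i + 1 < n and s[i + 1] == "/":
--                 m.append("  "); st = "code"; i += 2; continue
--             m.append(" "); i += 1
--         else:  # string or char literal
--             if c == "\\":
--                 m.append("  " if i + 1 < n else " "); i += 2; continue
--             if (st == "string" and c == '"') or (st == "char" and c == "'"):
--                 st = "code"
--             m.append(" "); i += 1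
--     masked = "".join(m)
--     # pass 2: bracket depths over the masked string, indices into the original s
--     d = [0, 0, 0, 0]
--     opens = "([{<"
--     closes = ")]}>"
--     for i, c in enumerate(masked):
--         k = opens.find(c)
--         if k >= 0:
--             d[k] += 1
--             continue
--         k = closes.find(c)
--         if k >= 0:
--             if d[k] > 0:
--                 d[k] -= 1
--             continue
--         if c == "=" and d == [0, 0, 0, 0]:
--             prev = s[i - 1] if i > 0 else ""
--             nxt = s[i + 1] if i + 1 < n else ""
--             if prev not in "<>!=" and nxt != "=":
--                 return s[:i], s[i:]
--     return s, ""
-- ===== Notes on version B (the rewrite author's own statement) =====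
-- stated objective: alternative
-- what changed: A's single fused state machine (comment/string state and bracket depths in one loop) is split into two passes: first build a same-length masked string with comments and string/char literals blanked out, then scan the mask tracking the four bracket depths to find the first top-level '='.
import Mathlib
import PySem

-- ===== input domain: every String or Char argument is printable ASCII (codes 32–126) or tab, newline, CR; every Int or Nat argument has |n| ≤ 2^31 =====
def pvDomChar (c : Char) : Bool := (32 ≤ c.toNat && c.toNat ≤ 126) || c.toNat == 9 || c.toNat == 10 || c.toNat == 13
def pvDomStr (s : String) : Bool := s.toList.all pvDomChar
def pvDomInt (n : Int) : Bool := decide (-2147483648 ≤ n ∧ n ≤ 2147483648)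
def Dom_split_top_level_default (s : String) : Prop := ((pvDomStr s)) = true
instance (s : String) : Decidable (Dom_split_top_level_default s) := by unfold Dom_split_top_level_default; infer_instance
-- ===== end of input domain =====

-- B is a two-pass re-decomposition (mask comments/literals, then scan the mask); same values, similar cost.

-- ===== PORT A =====
-- A's fused single-pass state machine: comment/string state and bracket depths in one loop.
inductive AState | code | line | block | strlit | chrlit
deriving DecidableEq, Repr

-- Python `prev (not) in "<>!="` where prev = "" at i = 0 ("" is a substring, so `in` is True there)
def aPrevIn (p : Option Char) : Bool :=
  match p with
  | none => true
  | some c => c == '<' || c == '>' || c == '!' || c == '='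

def aNxtEq (n : Option Char) : Bool :=
  match n with
  | none => false
  | some c => c == '='

def aLoop (cs : List Char) (i : Nat) (st : AState) (dp db dc dl : Nat) : String × String :=
  if h : i < cs.length then
    -- Python's locals ch / nxt / prev are inlined: ch = cs[i], nxt = cs[i+1]?, prev = (if 0 < i then cs[i-1]? else none)
    match st with
    | .code =>
      if cs[i] == '/' && cs[i+1]? == some '/' then aLoop cs (i+2) .line dp db dc dl
      else if cs[i] == '/' && cs[i+1]? == some '*' then aLoop cs (i+2) .block dp db dc dl
      else if cs[i] == '"' then aLoop cs (i+1) .strlit dp db dc dl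
      else if cs[i] == '\'' then aLoop cs (i+1) .chrlit dp db dc dl
      else if cs[i] == '(' then aLoop cs (i+1) .code (dp+1) db dc dl
      else if cs[i] == ')' && dp > 0 then aLoop cs (i+1) .code (dp-1) db dc dl
      else if cs[i] == '[' then aLoop cs (i+1) .code dp (db+1) dc dl
      else if cs[i] == ']' && db > 0 then aLoop cs (i+1) .code dp (db-1) dc dl
      else if cs[i] == '{' then aLoop cs (i+1) .code dp db (dc+1) dl
      else if cs[i] == '}' && dc > 0 then aLoop cs (i+1) .code dp db (dc-1) dl
      else if cs[i] == '<' then aLoop cs (i+1) .code dp db dc (dl+1)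
      else if cs[i] == '>' && dl > 0 then aLoop cs (i+1) .code dp db dc (dl-1)
      else if cs[i] == '=' && (dp == 0 && db == 0 && dc == 0 && dl == 0)
              && !aPrevIn (if 0 < i then cs[i-1]? else none) && !aNxtEq cs[i+1]? then
        (String.ofList (cs.take i), String.ofList (cs.drop i))
      else aLoop cs (i+1) .code dp db dc dl
    | .line =>
      if cs[i] == '\n' then aLoop cs (i+1) .code dp db dc dl
      else aLoop cs (i+1) .line dp db dc dl
    | .block =>
      if cs[i] == '*' && cs[i+1]? == some '/' then aLoop cs (i+2) .code dp db dc dl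
      else aLoop cs (i+1) .block dp db dc dl
    | .strlit =>
      if cs[i] == '\\' then aLoop cs (i+2) .strlit dp db dc dl
      else if cs[i] == '"' then aLoop cs (i+1) .code dp db dc dl
      else aLoop cs (i+1) .strlit dp db dc dl
    | .chrlit =>
      if cs[i] == '\\' then aLoop cs (i+2) .chrlit dp db dc dl
      else if cs[i] == '\'' then aLoop cs (i+1) .code dp db dc dl
      else aLoop cs (i+1) .chrlit dp db dc dl
  else (String.ofList cs, "")
termination_by cs.length - i
decreasing_by all_goals omega

def split_top_level_default (s : String) : String × String :=
  aLoop s.toList 0 .code 0 0 0 0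

-- ===== PORT B =====
-- Pass 1: same-length mask of the string with comments and string/char literals blanked out.
inductive BMode | code | line | block | strlit | chrlit
deriving DecidableEq, Repr

def bMask (st : BMode) (cs : List Char) : List Char :=
  match st, cs with
  | _, [] => []
  | .code, c :: r =>
    if c == '/' && r.head? == some '/' then ' ' :: ' ' :: bMask .line r.tail
    else if c == '/' && r.head? == some '*' then ' ' :: ' ' :: bMask .block r.tail
    else if c == '"' then ' ' :: bMask .strlit r
    else if c == '\'' then ' ' :: bMask .chrlit r
    else c :: bMask .code r
  | .line, c :: r =>
    if c == '\n' then ' ' :: bMask .code r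
    else ' ' :: bMask .line r
  | .block, c :: r =>
    if c == '*' && r.head? == some '/' then ' ' :: ' ' :: bMask .code r.tail
    else ' ' :: bMask .block r
  | .strlit, c :: r =>
    if c == '\\' then (if r.isEmpty then [' '] else ' ' :: ' ' :: bMask .strlit r.tail)
    else if c == '"' then ' ' :: bMask .code r
    else ' ' :: bMask .strlit r
  | .chrlit, c :: r =>
    if c == '\\' then (if r.isEmpty then [' '] else ' ' :: ' ' :: bMask .chrlit r.tail)
    else if c == '\'' then ' ' :: bMask .code r
    else ' ' :: bMask .chrlit r
termination_by cs.length
decreasing_by all_goals simp [List.length_tail]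

-- Python `prev not in "<>!="` / `nxt != "="` with "" at the boundaries
def bPrevOk (p : Option Char) : Bool :=
  match p with
  | none => false
  | some c => !(c == '<' || c == '>' || c == '!' || c == '=')

def bNxtOk (n : Option Char) : Bool :=
  match n with
  | none => true
  | some c => !(c == '=')

-- Pass 2: bracket depths over the mask, split indices taken in the original list.
def bScan (cs : List Char) (m : List Char) (i : Nat) (d0 d1 d2 d3 : Nat) : String × String :=
  match m with
  | [] => (String.ofList cs, "")
  | c :: rest =>
    if c == '(' then bScan cs rest (i+1) (d0+1) d1 d2 d3
    else if c == '[' then bScan cs rest (i+1) d0 (d1+1) d2 d3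
    else if c == '{' then bScan cs rest (i+1) d0 d1 (d2+1) d3
    else if c == '<' then bScan cs rest (i+1) d0 d1 d2 (d3+1)
    else if c == ')' then bScan cs rest (i+1) (if d0 > 0 then d0-1 else d0) d1 d2 d3
    else if c == ']' then bScan cs rest (i+1) d0 (if d1 > 0 then d1-1 else d1) d2 d3
    else if c == '}' then bScan cs rest (i+1) d0 d1 (if d2 > 0 then d2-1 else d2) d3
    else if c == '>' then bScan cs rest (i+1) d0 d1 d2 (if d3 > 0 then d3-1 else d3)
    else if c == '=' && (d0 == 0 && d1 == 0 && d2 == 0 && d3 == 0)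
            && bPrevOk (if 0 < i then cs[i-1]? else none) && bNxtOk cs[i+1]? then
      (String.ofList (cs.take i), String.ofList (cs.drop i))
    else bScan cs rest (i+1) d0 d1 d2 d3

def split_top_level_default_alt (s : String) : String × String :=
  bScan s.toList (bMask .code s.toList) 0 0 0 0 0

-- ===== PRECONDITION & SPEC =====
def Spec_split_top_level_default (s : String) (out : String × String) : Prop := out = split_top_level_default_alt s
instance (s : String) (out : String × String) : Decidable (Spec_split_top_level_default s out) := by unfold Spec_split_top_level_default; infer_instance

-- ===== CLAIM (what is proved, stated in full; the proofs are below) =====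
def Claim_equal_split_top_level_default : Prop := ∀ (s : String), Dom_split_top_level_default s → Spec_split_top_level_default s (split_top_level_default s)

-- ===== LEMMAS AND PROOFS =====

def stOf : AState → BMode
  | .code => .code
  | .line => .line
  | .block => .block
  | .strlit => .strlit
  | .chrlit => .chrlit

theorem bPrevOk_eq (p : Option Char) : bPrevOk p = !aPrevIn p := by
  cases p <;> simp [aPrevIn, bPrevOk]

theorem bNxtOk_eq (n : Option Char) : bNxtOk n = !aNxtEq n := by
  cases n <;> simp [aNxtEq, bNxtOk]

set_option maxHeartbeats 2000000 in
theorem main_lemma (cs : List Char) (i : Nat) (st : AState) (dp db dc dl : Nat) :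
    aLoop cs i st dp db dc dl = bScan cs (bMask (stOf st) (cs.drop i)) i dp db dc dl := by
  fun_induction aLoop cs i st dp db dc dl <;>
  first
  | (rw [List.drop_eq_nil_of_le (by omega)]; simp [bMask, bScan])
  | ((conv_rhs => rw [List.drop_eq_getElem_cons (by omega)]);
     simp only [bMask, stOf, List.head?_drop, List.tail_drop];
     (try simp only [bScan, bPrevOk_eq, bNxtOk_eq]);
     (try simp_all [bScan, stOf, bPrevOk_eq, bNxtOk_eq]);
     (try split_ifs <;> simp_all [bScan, stOf, bPrevOk_eq, bNxtOk_eq]);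
     (try rfl))
  all_goals try (rw [List.drop_eq_nil_of_le (by omega)]; simp [bMask, bScan])
  all_goals try (split_ifs <;> simp_all [bScan, bPrevOk_eq, bNxtOk_eq])

-- ===== VERDICT (by name: the statement is the Claim_ definition above) =====
theorem split_top_level_default_spec : Claim_equal_split_top_level_default := by
  intro s _
  unfold Spec_split_top_level_default split_top_level_default split_top_level_default_alt
  simpa using main_lemma s.toList 0 .code 0 0 0 0
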